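-- pv_equiv track=rewrite | github.com/tr0j4n034/SPOJ | HPYNOS.py | f
-- ===== SOURCE A (Python) =====
-- def f(N):
--     for i in range(50):
--         s = 0
--         for j in str(N):
--             s += (ord(j) - 48) ** 2
--         if s == 1:
--             return i + 1
--         N = s
--     return -1
-- ===== SOURCE B (Python) =====
-- def f(N):
--     seen = set()
--     steps = 0
--     while True:
--         s = 0
--         for c in str(N):
--             s += (ord(c) - 48) ** 2
--         steps += 1
--         if s == 1:
--             return steps
--         if s in seen:
--             return -1
--         seen.add(s)
--         N = s
-- ===== Notes on version B (the rewrite author's own statement) =====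
-- stated objective: alternative
-- what changed: Replaces A's fixed-iteration cap by a while-loop that maintains a set of already-seen values and stops with the failure result on the first repeated value (cycle detection) instead of exhausting the cap; the digit-square step is unchanged.
import Mathlib
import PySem

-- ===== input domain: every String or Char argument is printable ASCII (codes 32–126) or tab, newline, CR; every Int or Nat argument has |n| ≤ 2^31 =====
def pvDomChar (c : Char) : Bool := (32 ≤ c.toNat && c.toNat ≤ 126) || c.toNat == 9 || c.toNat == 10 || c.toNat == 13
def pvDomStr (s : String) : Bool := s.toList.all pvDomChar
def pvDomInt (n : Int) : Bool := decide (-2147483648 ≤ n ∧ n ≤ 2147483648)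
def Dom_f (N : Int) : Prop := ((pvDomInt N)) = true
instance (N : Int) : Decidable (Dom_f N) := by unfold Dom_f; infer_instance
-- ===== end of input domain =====

-- B replaces A's fixed iteration cap by a while-loop with a `seen` set that stops on the first repeated value (cycle detection); same digit-square step and identical results on the stated domain.


-- shared digit step of both programs: s = 0; for j in str(N): s += (ord(j) - 48) ** 2
-- iterating the characters of str(N) = PySem.Int.toChars N (exact: PySem.Int.toList_toStr)
def digitSq (N : Int) : Int :=
  (PySem.Int.toChars N).foldl (fun s j => s + ((j.toNat : Int) - 48) ^ 2) 0

-- ===== PORT A =====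
-- `for i in range(50)` with early return, as recursion on the remaining iteration count
def fGo : Nat → Int → Nat → Int
  | 0, _, _ => -1
  | rem + 1, N, i =>
    let s := digitSq N
    if s = 1 then (i : Int) + 1
    else fGo rem s (i + 1)

def f (N : Int) : Int := fGo 50 N 0

-- ===== PORT B =====
-- `while True` with a `seen` set; the fuel argument only makes the recursion total
def bGo : Nat → PySem.Set Int → Int → Int → Int
  | 0, _, _, _ => -1
  | fuel + 1, seen, steps, N =>
    let s := digitSq N
    if s = 1 then steps + 1
    else if PySem.Set.contains seen s then -1
    else bGo fuel (PySem.Set.add seen s) (steps + 1) s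

def f_alt (N : Int) : Int := bGo 2000 PySem.Set.empty 0 N

-- ===== PRECONDITION & SPEC =====
def Spec_f (N : Int) (out : Int) : Prop := out = f_alt N
instance (N : Int) (out : Int) : Decidable (Spec_f N out) := by unfold Spec_f; infer_instance

-- ===== CLAIM (what is proved, stated in full; the proofs are below) =====
def Claim_equal_f : Prop := ∀ (N : Int), Dom_f N → Spec_f N (f N)

-- ===== LEMMAS AND PROOFS =====

lemma fGo_succ (rem : Nat) (N : Int) (i : Nat) :
    fGo (rem + 1) N i = if digitSq N = 1 then (i : Int) + 1 else fGo rem (digitSq N) (i + 1) := rfl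

lemma bGo_succ (fuel : Nat) (seen : PySem.Set Int) (steps N : Int) :
    bGo (fuel + 1) seen steps N =
      if digitSq N = 1 then steps + 1
      else if PySem.Set.contains seen (digitSq N) then -1
      else bGo fuel (PySem.Set.add seen (digitSq N)) (steps + 1) (digitSq N) := rfl

-- every char produced by Nat.toDigits 10 is an ASCII digit
lemma toDigitsCore_mem (f : Nat) : ∀ (n : Nat) (l : List Char) (c : Char),
    c ∈ Nat.toDigitsCore 10 f n l → c ∈ l ∨ (48 ≤ c.toNat ∧ c.toNat ≤ 57) := by
  induction f with
  | zero => intro n l c h; exact Or.inl h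
  | succ f ih =>
    intro n l c h
    rw [Nat.toDigitsCore] at h
    have hd : 48 ≤ (Nat.digitChar (n % 10)).toNat ∧ (Nat.digitChar (n % 10)).toNat ≤ 57 := by
      have h10 : n % 10 < 10 := Nat.mod_lt _ (by norm_num)
      interval_cases hh : n % 10 <;> simp [Nat.digitChar]
    by_cases hz : n / 10 = 0
    · rw [if_pos hz] at h
      rcases List.mem_cons.mp h with h | h
      · exact Or.inr (h ▸ hd)
      · exact Or.inl h
    · rw [if_neg hz] at h
      rcases ih (n / 10) (Nat.digitChar (n % 10) :: l) c h with h | h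
      · rcases List.mem_cons.mp h with h | h
        · exact Or.inr (h ▸ hd)
        · exact Or.inl h
      · exact Or.inr h

lemma toDigits_mem (n : Nat) (c : Char) (h : c ∈ Nat.toDigits 10 n) :
    48 ≤ c.toNat ∧ c.toNat ≤ 57 := by
  rcases toDigitsCore_mem (n + 1) n [] c h with h | h
  · simp at h
  · exact h

lemma charSq_bound (N : Int) (c : Char) (h : c ∈ PySem.Int.toChars N) :
    0 ≤ ((c.toNat : Int) - 48) ^ 2 ∧ ((c.toNat : Int) - 48) ^ 2 ≤ 81 := by
  refine ⟨sq_nonneg _, ?_⟩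
  unfold PySem.Int.toChars at h
  split_ifs at h with hn
  · rcases List.mem_cons.mp h with h | h
    · subst h; decide
    · have hb := toDigits_mem _ _ h
      have h1 : (48 : Int) ≤ c.toNat := by exact_mod_cast hb.1
      have h2 : (c.toNat : Int) ≤ 57 := by exact_mod_cast hb.2
      nlinarith
  · have hb := toDigits_mem _ _ h
    have h1 : (48 : Int) ≤ c.toNat := by exact_mod_cast hb.1
    have h2 : (c.toNat : Int) ≤ 57 := by exact_mod_cast hb.2
    nlinarith

lemma foldl_sq_bound (l : List Char) (acc : Int)
    (h : ∀ c ∈ l, 0 ≤ ((c.toNat : Int) - 48) ^ 2 ∧ ((c.toNat : Int) - 48) ^ 2 ≤ 81) :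
    acc ≤ l.foldl (fun s j => s + ((j.toNat : Int) - 48) ^ 2) acc ∧
    l.foldl (fun s j => s + ((j.toNat : Int) - 48) ^ 2) acc ≤ acc + 81 * l.length := by
  induction l generalizing acc with
  | nil => simp
  | cons x xs ih =>
    have hx := h x (by simp)
    have hxs := ih (acc + ((x.toNat : Int) - 48) ^ 2) (fun c hc => h c (by simp [hc]))
    refine ⟨le_trans (by linarith [hx.1]) hxs.1, ?_⟩
    simp only [List.foldl_cons, List.length_cons]
    have h2 := hxs.2
    push_cast at h2 ⊢
    linarith [hx.2]

lemma toChars_length (N : Int) (hD : Dom_f N) : (PySem.Int.toChars N).length ≤ 11 := by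
  have hb : N.natAbs ≤ 2147483648 := by
    unfold Dom_f pvDomInt at hD
    simp only [decide_eq_true_eq] at hD
    omega
  have hlt : N.natAbs < 10 ^ 10 := by omega
  unfold PySem.Int.toChars
  split_ifs with hn
  · have hl := Nat.toDigits_length 10 N.natAbs 10 (by norm_num) hlt
    simp only [List.length_cons]
    omega
  · have hlt' : N.toNat < 10 ^ 10 := by omega
    have hl := Nat.toDigits_length 10 N.toNat 10 (by norm_num) hlt'
    omega

lemma digitSq_bound (N : Int) (hD : Dom_f N) : 0 ≤ digitSq N ∧ digitSq N ≤ 891 := by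
  unfold digitSq
  have h := foldl_sq_bound (PySem.Int.toChars N) 0 (fun c hc => charSq_bound N c hc)
  have hlen : ((PySem.Int.toChars N).length : Int) ≤ 11 := by
    exact_mod_cast toChars_length N hD
  refine ⟨h.1, ?_⟩
  nlinarith [h.2]

-- the finite core: from every value reachable after the first step, A's remaining
-- 49 capped iterations and B's seen-set loop return the same answer
set_option maxRecDepth 100000 in
set_option maxHeartbeats 8000000 in
lemma tails_eq : ∀ n : Nat, n < 892 →
    fGo 49 (n : Int) 1 = bGo 1999 (PySem.Set.add PySem.Set.empty (n : Int)) 1 (n : Int) := by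
  decide

-- ===== VERDICT (by name: the statement is the Claim_ definition above) =====
theorem f_spec : Claim_equal_f := by
  intro N hD
  unfold Spec_f f f_alt
  rw [show (50 : Nat) = 49 + 1 from rfl, show (2000 : Nat) = 1999 + 1 from rfl,
    fGo_succ, bGo_succ]
  have hb := digitSq_bound N hD
  by_cases h1 : digitSq N = 1
  · simp [h1]
  · rw [if_neg h1, if_neg h1]
    have hc : PySem.Set.contains PySem.Set.empty (digitSq N) = false := rfl
    rw [hc]
    simp only [Bool.false_eq_true, if_false, zero_add]
    have hn : ((digitSq N).toNat : Int) = digitSq N := Int.toNat_of_nonneg hb.1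
    rw [← hn]
    exact tails_eq (digitSq N).toNat (by omega)
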